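-- pv_equiv track=rewrite | github.com/R2509/ee106-project | simple_cli.py | _split_command_text
-- ===== SOURCE A (Python) =====
-- def _split_command_text(command_text: str):
--     '''
--     Ensures that all double-quoted string arguments in the input text are
--     kept intact.
--     '''
--     initial_split = command_text.split()
--
--     out = []
--     acc = ''
--     for item in initial_split:
--         append = False
--
--         if not '"' in item:
--             append = True
--         if len(acc) > 0 and '"' in item:
--             append = True
--         if item[0] == '"' and len(item) > 1 and item[-1] == '"':
--             append = True
--
--         if len(acc) > 0:
--             acc += f' {item}'
--         else:
--             acc = item
--         if append:
--             out.append(acc.strip().strip('"'))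
--             acc = ''
--
--     return out
-- ===== SOURCE B (Python) =====
-- def _split_command_text(command_text: str):
--     '''
--     Ensures that all double-quoted string arguments in the input text are
--     kept intact.
--     '''
--     tokens = command_text.split()
--     out = []
--     i = 0
--     while i < len(tokens):
--         t = tokens[i]
--         if '"' not in t or (t[0] == '"' and len(t) > 1 and t[-1] == '"'):
--             # a complete argument on its own
--             out.append(t.strip('"'))
--             i += 1
--         elif i + 1 < len(tokens):
--             # opening fragment: pair it with the following token
--             out.append((t + ' ' + tokens[i + 1]).strip('"'))
--             i += 2
--         else:
--             # unpaired trailing fragment is dropped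
--             i += 1
--     return out
-- ===== Notes on version B (the rewrite author's own statement) =====
-- stated objective: simpler
-- what changed: A's accumulator-and-three-flag fold is replaced by an index walk over the split tokens that classifies each token as complete (and emits it) or as an opening quoted fragment (and pairs it directly with the next token), using the fact that A's accumulator never holds more than one pending token.
import Mathlib
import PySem

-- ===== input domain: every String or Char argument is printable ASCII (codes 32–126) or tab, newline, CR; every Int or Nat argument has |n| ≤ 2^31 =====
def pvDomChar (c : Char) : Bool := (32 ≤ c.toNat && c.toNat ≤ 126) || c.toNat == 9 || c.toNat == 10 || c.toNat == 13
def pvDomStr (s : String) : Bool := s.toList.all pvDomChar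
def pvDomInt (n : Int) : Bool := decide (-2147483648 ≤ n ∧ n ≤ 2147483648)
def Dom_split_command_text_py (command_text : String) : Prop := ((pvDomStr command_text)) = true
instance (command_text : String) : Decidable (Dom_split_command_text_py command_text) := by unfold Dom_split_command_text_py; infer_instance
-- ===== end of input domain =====

-- B replaces A's accumulator-and-flag fold with an index walk over the token list that pairs an
-- opening quoted fragment directly with its successor (simpler decomposition, same cost).

-- ===== PORT A =====
-- one step of A's for-loop; state = (out, acc)
def pvAStep (st : List (List Char) × List Char) (item : List Char) :
    List (List Char) × List Char :=
  let append : Bool :=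
    (!PySem.Chars.isIn ['"'] item)
    || (decide (0 < st.2.length) && PySem.Chars.isIn ['"'] item)
    || ((PySem.List.pyGet? item 0 == some '"') && decide (1 < item.length)
         && (PySem.List.pyGet? item (-1) == some '"'))
  let acc : List Char := if 0 < st.2.length then st.2 ++ ' ' :: item else item
  if append then
    (st.1 ++ [PySem.Chars.stripChars (PySem.Chars.strip acc) ['"']], [])
  else (st.1, acc)

def split_command_text_py (command_text : String) : List String :=
  (((PySem.Chars.split₀ command_text.toList).foldl pvAStep ([], [])).1).map String.ofList

-- ===== PORT B =====
-- B's while-loop over the token list, with explicit lookahead pairing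
def pvBLoop : List (List Char) → List (List Char)
  | [] => []
  | t :: rest =>
    if (!PySem.Chars.isIn ['"'] t)
        || ((PySem.List.pyGet? t 0 == some '"') && decide (1 < t.length)
             && (PySem.List.pyGet? t (-1) == some '"')) then
      PySem.Chars.stripChars t ['"'] :: pvBLoop rest
    else
      match rest with
      | u :: rest' => PySem.Chars.stripChars (t ++ ' ' :: u) ['"'] :: pvBLoop rest'
      | [] => []

def split_command_text_py_alt (command_text : String) : List String :=
  (pvBLoop (PySem.Chars.split₀ command_text.toList)).map String.ofList

-- ===== PRECONDITION & SPEC =====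
def Spec_split_command_text_py (command_text : String) (out : List String) : Prop := out = split_command_text_py_alt command_text
instance (command_text : String) (out : List String) : Decidable (Spec_split_command_text_py command_text out) := by unfold Spec_split_command_text_py; infer_instance

-- ===== CLAIM (what is proved, stated in full; the proofs are below) =====
def Claim_equal_split_command_text_py : Prop := ∀ (command_text : String), Dom_split_command_text_py command_text → Spec_split_command_text_py command_text (split_command_text_py command_text)

-- ===== LEMMAS AND PROOFS =====

-- a "good" token: nonempty and whitespace-free (exactly what str.split() produces)
def pvGood (t : List Char) : Prop :=
  t ≠ [] ∧ ∀ c ∈ t, PySem.Chars.isspace c = false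

theorem pv_go_good (s : List Char) : ∀ (cur : List Char) (acc : List (List Char)),
    (∀ c ∈ cur, PySem.Chars.isspace c = false) → (∀ t ∈ acc, pvGood t) →
    ∀ t ∈ PySem.Chars.split₀.go s cur acc, pvGood t := by
  induction s with
  | nil =>
    intro cur acc hcur hacc t ht
    unfold PySem.Chars.split₀.go at ht
    split at ht
    · exact hacc t (by simpa using ht)
    · rename_i hcemp
      simp at ht
      rcases ht with h | h
      · exact hacc t h
      · subst h
        exact ⟨by simpa using hcemp, fun c hc => hcur c (by simpa using hc)⟩
  | cons c rest ih =>
    intro cur acc hcur hacc t ht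
    unfold PySem.Chars.split₀.go at ht
    split at ht
    · split at ht
      · exact ih [] acc (by simp) hacc t ht
      · rename_i hcemp
        refine ih [] _ (by simp) ?_ t ht
        intro u hu
        simp at hu
        rcases hu with h | h
        · subst h
          exact ⟨by simpa using hcemp, fun d hd => hcur d (by simpa using hd)⟩
        · exact hacc u h
    · rename_i hsp
      refine ih (c :: cur) acc ?_ hacc t ht
      intro d hd
      rcases List.mem_cons.mp hd with h | h
      · subst h; simpa using hsp
      · exact hcur d h

theorem pv_split₀_good (s : List Char) : ∀ t ∈ PySem.Chars.split₀ s, pvGood t := by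
  exact pv_go_good s [] [] (by simp) (by simp)

lemma pv_strip_eq (l : List Char) (hne : l ≠ [])
    (hh : PySem.Chars.isspace (l.head hne) = false)
    (hl : PySem.Chars.isspace (l.getLast hne) = false) :
    PySem.Chars.strip l = l := by
  have h1 : List.dropWhile PySem.Chars.isspace l = l := by
    rw [List.dropWhile_eq_self_iff]
    intro hlen
    rw [List.getElem_zero]
    simp [hh]
  have h2 : List.dropWhile PySem.Chars.isspace l.reverse = l.reverse := by
    rw [List.dropWhile_eq_self_iff]
    intro hlen
    rw [List.getElem_zero, List.head_reverse]
    simp [hl]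
  simp [PySem.Chars.strip, PySem.Chars.lstrip, PySem.Chars.rstrip, h1, h2]

lemma pv_strip_good (t : List Char) (hg : pvGood t) : PySem.Chars.strip t = t :=
  pv_strip_eq t hg.1 (hg.2 _ (List.head_mem hg.1)) (hg.2 _ (List.getLast_mem hg.1))

lemma pv_strip_pair (t u : List Char) (ht : pvGood t) (hu : pvGood u) :
    PySem.Chars.strip (t ++ ' ' :: u) = t ++ ' ' :: u := by
  have hne : t ++ ' ' :: u ≠ [] := by simp
  apply pv_strip_eq _ hne
  · rw [List.head_append_left ht.1]
    exact ht.2 _ (List.head_mem ht.1)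
  · rw [List.getLast_append_of_ne_nil hne (by simp), List.getLast_cons hu.1]
    exact hu.2 _ (List.getLast_mem hu.1)

lemma pvBLoop_cons_true (t : List Char) (rest : List (List Char))
    (hc : ((!PySem.Chars.isIn ['"'] t)
        || ((PySem.List.pyGet? t 0 == some '"') && decide (1 < t.length)
             && (PySem.List.pyGet? t (-1) == some '"'))) = true) :
    pvBLoop (t :: rest) = PySem.Chars.stripChars t ['"'] :: pvBLoop rest := by
  cases rest with
  | nil => rw [pvBLoop.eq_3, if_pos hc]
  | cons u rest' => rw [pvBLoop.eq_2, if_pos hc]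

theorem pv_key (ts : List (List Char)) (h : ∀ t ∈ ts, pvGood t) :
    ∀ out, (ts.foldl pvAStep (out, [])).1 = out ++ pvBLoop ts := by
  induction ts using pvBLoop.induct with
  | case1 => intro out; simp [pvBLoop]
  | case2 t rest hc ih =>
    intro out
    have ht := h t (by simp)
    rw [List.foldl_cons]
    have hstep : pvAStep (out, []) t
        = (out ++ [PySem.Chars.stripChars t ['"']], []) := by
      simp only [pvAStep]
      simp [hc, pv_strip_good t ht]
    rw [hstep, ih (fun v hv => h v (by simp [hv])), pvBLoop_cons_true t rest hc]
    simp
  | case3 t hc u rest' ih =>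
    intro out
    have ht := h t (by simp)
    have hu := h u (by simp)
    have hc' := Bool.not_eq_true _ |>.mp hc
    have hisin : PySem.Chars.isIn ['"'] t = true := by
      by_contra hx
      rw [Bool.not_eq_true] at hx
      rw [hx] at hc'
      simp at hc'
    rw [List.foldl_cons]
    have hstep1 : pvAStep (out, []) t = (out, t) := by
      simp only [pvAStep]
      simp [hc']
    rw [hstep1, List.foldl_cons]
    have hstep2 : pvAStep (out, t) u
        = (out ++ [PySem.Chars.stripChars (t ++ ' ' :: u) ['"']], []) := by
      simp only [pvAStep]
      have htlen : 0 < t.length := List.length_pos_iff.mpr ht.1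
      cases hiu : PySem.Chars.isIn ['"'] u <;>
        simp [htlen, pv_strip_pair t u ht hu]
    rw [hstep2, ih (fun v hv => h v (by simp [hv])), pvBLoop.eq_2, if_neg (by simp [hc'])]
    simp
  | case4 t hc =>
    intro out
    have hc' := Bool.not_eq_true _ |>.mp hc
    rw [List.foldl_cons]
    have hstep1 : pvAStep (out, []) t = (out, t) := by
      simp only [pvAStep]
      simp [hc']
    rw [hstep1, pvBLoop.eq_3, if_neg (by simp [hc'])]
    simp

-- ===== VERDICT (by name: the statement is the Claim_ definition above) =====
theorem split_command_text_py_spec : Claim_equal_split_command_text_py := by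
  intro s _
  unfold Spec_split_command_text_py split_command_text_py split_command_text_py_alt
  rw [pv_key _ (pv_split₀_good _) []]
  rfl
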